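-- pv_equiv track=rewrite | github.com/Juanvr/Dathoven | Dathoven.py | from_array_of_intervals_to_pitches_with_time
-- ===== SOURCE A (Python) =====
-- def from_array_of_intervals_to_pitches_with_time (root_pitch, intervals_with_time):
--     elements = [{
--             'absolute_offset': 0,
--             'pitch': root_pitch,
--             'duration': 1
--         }]
--     for interval in intervals_with_time:
--         previousElement = elements[-1]
--         resultElement = {
--             'absolute_offset': previousElement['absolute_offset'] + interval['relative_offset'],
--             'pitch': previousElement['pitch'] + interval['interval'],
--             'duration': interval['duration'],
--         }
--         elements.append(resultElement)
--     return elements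
-- ===== SOURCE B (Python) =====
-- def from_array_of_intervals_to_pitches_with_time(root_pitch, intervals_with_time):
--     # prefix tables: cumulative offsets/pitches and the duration column, zipped together
--     offsets = _prefix_sums(0, [iv['relative_offset'] for iv in intervals_with_time])
--     pitches = _prefix_sums(root_pitch, [iv['interval'] for iv in intervals_with_time])
--     durations = [1] + [iv['duration'] for iv in intervals_with_time]
--     return [{'absolute_offset': o, 'pitch': p, 'duration': d}
--             for (o, p), d in zip(zip(offsets, pitches), durations)]
--
-- def _prefix_sums(seed, xs):
--     out, acc = [seed], seed
--     for x in xs: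
--         acc = acc + x
--         out.append(acc)
--     return out
-- ===== Notes on version B (the rewrite author's own statement) =====
-- stated objective: alternative
-- what changed: Replaces the self-referential loop that reads elements[-1] with precomputed prefix-sum tables for offsets and pitches plus a duration column, zipped into the output dicts in one assembly pass.
import Mathlib
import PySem

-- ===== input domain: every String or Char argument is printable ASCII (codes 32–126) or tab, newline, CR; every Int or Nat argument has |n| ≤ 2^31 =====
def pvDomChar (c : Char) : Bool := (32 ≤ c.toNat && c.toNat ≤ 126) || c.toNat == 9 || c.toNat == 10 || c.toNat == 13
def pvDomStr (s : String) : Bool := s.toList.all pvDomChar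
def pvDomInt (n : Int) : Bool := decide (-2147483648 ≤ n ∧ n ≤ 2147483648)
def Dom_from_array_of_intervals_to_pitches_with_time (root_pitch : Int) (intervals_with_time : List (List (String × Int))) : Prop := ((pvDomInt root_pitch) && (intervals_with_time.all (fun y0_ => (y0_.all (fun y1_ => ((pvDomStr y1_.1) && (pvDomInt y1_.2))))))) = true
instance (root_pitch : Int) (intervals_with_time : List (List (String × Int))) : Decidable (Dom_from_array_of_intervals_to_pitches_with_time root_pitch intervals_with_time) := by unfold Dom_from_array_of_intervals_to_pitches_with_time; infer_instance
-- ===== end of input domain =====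

-- B replaces the self-referential elements[-1] loop by precomputed prefix-sum tables zipped together; return value only, no mutation.

-- shared dict-access helper: d[k] on an association list = first match
-- (Pre_ guarantees the key is present, so the .getD 0 default is never used inside Pre_)
def getKey (iv : List (String × Int)) (k : String) : Int :=
  ((iv.find? (fun p => p.1 == k)).map (·.2)).getD 0

-- ===== PORT A =====
def from_array_of_intervals_to_pitches_with_time (root_pitch : Int) (intervals_with_time : List (List (String × Int))) : List (List (String × Int)) :=
  intervals_with_time.foldl
    (fun elements interval =>
      let previousElement := (PySem.List.pyGet? elements (-1)).getD []
      let resultElement : List (String × Int) :=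
        [("absolute_offset", getKey previousElement "absolute_offset" + getKey interval "relative_offset"),
         ("pitch", getKey previousElement "pitch" + getKey interval "interval"),
         ("duration", getKey interval "duration")]
      elements ++ [resultElement])
    [[("absolute_offset", 0), ("pitch", root_pitch), ("duration", 1)]]

-- ===== PORT B =====
-- _prefix_sums: the loop appending running sums
def prefixSums (seed : Int) (xs : List Int) : List Int :=
  (xs.foldl (fun (s : List Int × Int) x => (s.1 ++ [s.2 + x], s.2 + x)) ([seed], seed)).1

def from_array_of_intervals_to_pitches_with_time_alt (root_pitch : Int) (intervals_with_time : List (List (String × Int))) : List (List (String × Int)) :=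
  let offsets := prefixSums 0 (intervals_with_time.map (fun iv => getKey iv "relative_offset"))
  let pitches := prefixSums root_pitch (intervals_with_time.map (fun iv => getKey iv "interval"))
  let durations := 1 :: intervals_with_time.map (fun iv => getKey iv "duration")
  ((offsets.zip pitches).zip durations).map
    (fun opd => [("absolute_offset", opd.1.1), ("pitch", opd.1.2), ("duration", opd.2)])

-- ===== PRECONDITION & SPEC =====
-- Pre_: every interval dict carries the keys 'relative_offset', 'interval' and 'duration';
-- on a dict missing one of them the Python A (and B) raises KeyError.
def Pre_from_array_of_intervals_to_pitches_with_time (root_pitch : Int) (intervals_with_time : List (List (String × Int))) : Prop :=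
  intervals_with_time.all (fun iv =>
    (iv.map Prod.fst).contains "relative_offset" &&
    (iv.map Prod.fst).contains "interval" &&
    (iv.map Prod.fst).contains "duration") = true
instance (root_pitch : Int) (intervals_with_time : List (List (String × Int))) : Decidable (Pre_from_array_of_intervals_to_pitches_with_time root_pitch intervals_with_time) := by unfold Pre_from_array_of_intervals_to_pitches_with_time; infer_instance

def pvWitness_from_array_of_intervals_to_pitches_with_time : Int × (List (List (String × Int))) :=
  (60, [[("relative_offset", 1), ("interval", 2), ("duration", 1)],
        [("relative_offset", 2), ("interval", -3), ("duration", 2)]])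

def Spec_from_array_of_intervals_to_pitches_with_time (root_pitch : Int) (intervals_with_time : List (List (String × Int))) (out : List (List (String × Int))) : Prop := out = from_array_of_intervals_to_pitches_with_time_alt root_pitch intervals_with_time
instance (root_pitch : Int) (intervals_with_time : List (List (String × Int))) (out : List (List (String × Int))) : Decidable (Spec_from_array_of_intervals_to_pitches_with_time root_pitch intervals_with_time out) := by unfold Spec_from_array_of_intervals_to_pitches_with_time; infer_instance

-- ===== CLAIM (what is proved, stated in full; the proofs are below) =====
def Claim_equal_from_array_of_intervals_to_pitches_with_time : Prop := ∀ (root_pitch : Int) (intervals_with_time : List (List (String × Int))), Dom_from_array_of_intervals_to_pitches_with_time root_pitch intervals_with_time → Pre_from_array_of_intervals_to_pitches_with_time root_pitch intervals_with_time → Spec_from_array_of_intervals_to_pitches_with_time root_pitch intervals_with_time (from_array_of_intervals_to_pitches_with_time root_pitch intervals_with_time)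

-- ===== LEMMAS AND PROOFS =====

-- reference shape: the elements appended after a head whose offset/pitch are o/p
def build (o p : Int) : List (List (String × Int)) → List (List (String × Int))
  | [] => []
  | iv :: rest =>
      let o' := o + getKey iv "relative_offset"
      let p' := p + getKey iv "interval"
      [("absolute_offset", o'), ("pitch", p'), ("duration", getKey iv "duration")] :: build o' p' rest

def mkElem (o p d : Int) : List (String × Int) :=
  [("absolute_offset", o), ("pitch", p), ("duration", d)]

theorem getKey_mkElem_off (o p d : Int) : getKey (mkElem o p d) "absolute_offset" = o := by
  simp [getKey, mkElem]

theorem getKey_mkElem_pitch (o p d : Int) : getKey (mkElem o p d) "pitch" = p := by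
  simp [getKey, mkElem]

theorem A_loop (ivs : List (List (String × Int))) :
    ∀ (acc : List (List (String × Int))) (o p d : Int),
    ivs.foldl
      (fun elements interval =>
        let previousElement := (PySem.List.pyGet? elements (-1)).getD []
        let resultElement : List (String × Int) :=
          [("absolute_offset", getKey previousElement "absolute_offset" + getKey interval "relative_offset"),
           ("pitch", getKey previousElement "pitch" + getKey interval "interval"),
           ("duration", getKey interval "duration")]
        elements ++ [resultElement])
      (acc ++ [mkElem o p d])
    = (acc ++ [mkElem o p d]) ++ build o p ivs := by
  induction ivs with
  | nil => intro acc o p d; simp [build]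
  | cons iv rest ih =>
      intro acc o p d
      simp only [List.foldl_cons]
      have hlast : PySem.List.pyGet? (acc ++ [mkElem o p d]) (-1) = some (mkElem o p d) := by
        rw [PySem.List.pyGet?_neg_one]; simp
      rw [show (acc ++ [mkElem o p d]) ++
            [[("absolute_offset", getKey ((PySem.List.pyGet? (acc ++ [mkElem o p d]) (-1)).getD []) "absolute_offset" + getKey iv "relative_offset"),
              ("pitch", getKey ((PySem.List.pyGet? (acc ++ [mkElem o p d]) (-1)).getD []) "pitch" + getKey iv "interval"),
              ("duration", getKey iv "duration")]]
          = ((acc ++ [mkElem o p d]) ++ [mkElem (o + getKey iv "relative_offset") (p + getKey iv "interval") (getKey iv "duration")]) from by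
        rw [hlast]; simp only [Option.getD_some, getKey_mkElem_off, getKey_mkElem_pitch]; rfl]
      rw [ih ((acc ++ [mkElem o p d])) (o + getKey iv "relative_offset") (p + getKey iv "interval") (getKey iv "duration")]
      simp [build, mkElem]

-- prefixSums as a structural recursion
def pfx (acc : Int) : List Int → List Int
  | [] => []
  | x :: rest => (acc + x) :: pfx (acc + x) rest

theorem prefixSums_inv (xs : List Int) :
    ∀ (out : List Int) (acc : Int),
    (xs.foldl (fun (s : List Int × Int) x => (s.1 ++ [s.2 + x], s.2 + x)) (out, acc)).1
      = out ++ pfx acc xs := by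
  induction xs with
  | nil => intro out acc; simp [pfx]
  | cons x rest ih =>
      intro out acc
      simp only [List.foldl_cons]
      rw [ih (out ++ [acc + x]) (acc + x)]
      simp [pfx]

theorem prefixSums_eq (seed : Int) (xs : List Int) :
    prefixSums seed xs = seed :: pfx seed xs := by
  unfold prefixSums
  rw [prefixSums_inv xs [seed] seed]
  simp

theorem B_tail (ivs : List (List (String × Int))) :
    ∀ (o p : Int),
    (((pfx o (ivs.map (fun iv => getKey iv "relative_offset"))).zip
        (pfx p (ivs.map (fun iv => getKey iv "interval")))).zip
        (ivs.map (fun iv => getKey iv "duration"))).map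
      (fun opd => [("absolute_offset", opd.1.1), ("pitch", opd.1.2), ("duration", opd.2)])
    = build o p ivs := by
  induction ivs with
  | nil => intro o p; simp [pfx, build]
  | cons iv rest ih =>
      intro o p
      simp only [List.map_cons, pfx, List.zip_cons_cons, build]
      rw [ih (o + getKey iv "relative_offset") (p + getKey iv "interval")]

-- ===== VERDICT (by name: the statement is the Claim_ definition above) =====
theorem from_array_of_intervals_to_pitches_with_time_spec : Claim_equal_from_array_of_intervals_to_pitches_with_time := by
  intro root_pitch ivs _ _
  unfold Spec_from_array_of_intervals_to_pitches_with_time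
  unfold from_array_of_intervals_to_pitches_with_time from_array_of_intervals_to_pitches_with_time_alt
  rw [show ([[("absolute_offset", (0:Int)), ("pitch", root_pitch), ("duration", (1:Int))]] : List (List (String × Int))) = [] ++ [mkElem 0 root_pitch 1] from by simp [mkElem]]
  rw [A_loop ivs [] 0 root_pitch 1]
  simp only [prefixSums_eq, List.zip_cons_cons, List.map_cons]
  rw [B_tail ivs 0 root_pitch]
  simp [mkElem]
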